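-- pv_equiv track=rewrite | github.com/HernanRossi-Dev/AI_A4 | LogicProgramming.py | findGrandparent
-- ===== SOURCE A (Python) =====
-- def findGrandparent(parents, grandchild):
--     grandchildsParents = []
--     grandchildsGrandparents = []
--     for parent in parents:
--         children = parents[parent]
--         for currentChild in children:
--             if currentChild == grandchild:
--                 grandchildsParents.append(parent)
--     for parent in grandchildsParents:
--         for currentparent in parents:
--             children = parents[currentparent]
--             for currentChild in children:
--                 if currentChild == parent:
--                     grandchildsGrandparents.append(currentparent)
--
--     return grandchildsGrandparents
-- ===== SOURCE B (Python) =====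
-- def findGrandparent(parents, grandchild):
--     # One pass builds a reverse child -> [parents] index, then two direct lookups.
--     reverse = {}
--     for parent, children in parents.items():
--         for child in children:
--             reverse.setdefault(child, []).append(parent)
--     return [gp for p in reverse.get(grandchild, []) for gp in reverse.get(p, [])]
-- ===== Notes on version B (the rewrite author's own statement) =====
-- stated objective: alternative
-- what changed: A re-scans the whole parent->children map once per discovered parent; B instead builds a reverse child->parents index in one pass and answers with two direct lookups (same cost on maps where the grandchild has few parents, avoids the repeated scans when it has many).
import Mathlib
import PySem

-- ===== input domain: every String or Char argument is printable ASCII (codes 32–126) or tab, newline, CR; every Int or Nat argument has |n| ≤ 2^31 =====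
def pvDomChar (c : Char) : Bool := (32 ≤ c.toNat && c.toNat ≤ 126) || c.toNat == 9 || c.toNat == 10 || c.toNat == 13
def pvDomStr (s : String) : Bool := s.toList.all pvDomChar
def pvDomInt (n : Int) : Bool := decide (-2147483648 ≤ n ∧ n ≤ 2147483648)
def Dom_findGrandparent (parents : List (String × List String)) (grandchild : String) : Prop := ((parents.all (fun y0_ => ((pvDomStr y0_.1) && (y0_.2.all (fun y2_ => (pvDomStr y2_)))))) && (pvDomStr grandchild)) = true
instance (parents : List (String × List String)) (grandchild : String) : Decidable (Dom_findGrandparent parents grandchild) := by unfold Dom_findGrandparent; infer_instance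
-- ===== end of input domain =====

-- B replaces A's repeated full scans of the map with a reverse child->parents index built in one
-- pass plus two direct lookups (objective: alternative — a different traversal, not measured faster).


-- ===== PORT A =====
-- A iterates the dict's keys and looks each key up ('children = parents[parent]'); the lookup
-- always succeeds because the key comes from the dict itself, so getD's default is never used.
def findGrandparent (parents : List (String × List String)) (grandchild : String) : List String :=
  let d := PySem.Dict.mk parents
  let grandchildsParents :=
    d.keys.foldl (fun acc parent =>
      (d.getD parent []).foldl (fun a currentChild =>
        if currentChild == grandchild then a ++ [parent] else a) acc) []
  grandchildsParents.foldl (fun acc p =>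
    d.keys.foldl (fun acc2 currentparent =>
      (d.getD currentparent []).foldl (fun a currentChild =>
        if currentChild == p then a ++ [currentparent] else a) acc2) acc) []

-- ===== PORT B =====
-- 'reverse.setdefault(child, []).append(parent)' is exactly Dict.modify child [] (· ++ [parent]).
def findGrandparent_alt (parents : List (String × List String)) (grandchild : String) : List String :=
  let reverse := parents.foldl (fun rev kv =>
    kv.2.foldl (fun rev child => rev.modify child [] (· ++ [kv.1])) rev) PySem.Dict.empty
  (reverse.getD grandchild []).flatMap (fun p => reverse.getD p [])

-- ===== PRECONDITION & SPEC =====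
-- Pre_ excludes association lists with duplicate keys: the argument represents a Python dict,
-- whose keys are unique; on a raw Python list with repeated keys A itself raises TypeError.
def Pre_findGrandparent (parents : List (String × List String)) (grandchild : String) : Prop :=
  (parents.map (·.1)).Nodup
instance (parents : List (String × List String)) (grandchild : String) : Decidable (Pre_findGrandparent parents grandchild) := by unfold Pre_findGrandparent; infer_instance

def pvWitness_findGrandparent : (List (String × List String)) × String :=
  ([("a", ["b", "c"]), ("b", ["d"]), ("c", ["d", "d"]), ("d", [])], "d")

def Spec_findGrandparent (parents : List (String × List String)) (grandchild : String) (out : List String) : Prop := out = findGrandparent_alt parents grandchild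
instance (parents : List (String × List String)) (grandchild : String) (out : List String) : Decidable (Spec_findGrandparent parents grandchild out) := by unfold Spec_findGrandparent; infer_instance

-- ===== CLAIM (what is proved, stated in full; the proofs are below) =====
def Claim_equal_findGrandparent : Prop := ∀ (parents : List (String × List String)) (grandchild : String), Dom_findGrandparent parents grandchild → Pre_findGrandparent parents grandchild → Spec_findGrandparent parents grandchild (findGrandparent parents grandchild)

-- ===== LEMMAS AND PROOFS =====

-- the list (in scan order, with multiplicity) of parents of x, from the flat (child, parent) pairs
def pvOcc (parents : List (String × List String)) (x : String) : List String :=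
  ((parents.flatMap (fun kv => kv.2.map (fun c => (c, kv.1)))).filter (fun p => p.1 == x)).map (·.2)

lemma pvFoldKeys {α : Type} (ps : List (String × List String)) (f : String → List String)
    (g : α → String → List String → α) (h : ∀ kv ∈ ps, f kv.1 = kv.2) :
    ∀ acc : α, (ps.map (·.1)).foldl (fun a k => g a k (f k)) acc
      = ps.foldl (fun a kv => g a kv.1 kv.2) acc := by
  induction ps with
  | nil => intro acc; rfl
  | cons kv rest ih =>
      intro acc
      simp only [List.map_cons, List.foldl_cons, h kv (by simp)]
      exact ih (fun p hp => h p (by simp [hp])) _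

lemma pvScan_acc (ps : List (String × List String)) (x : String) (acc : List String) :
    ps.foldl (fun acc kv =>
      kv.2.foldl (fun a c => if c == x then a ++ [kv.1] else a) acc) acc
    = acc ++ pvOcc ps x := by
  calc ps.foldl (fun acc kv =>
        kv.2.foldl (fun a c => if c == x then a ++ [kv.1] else a) acc) acc
      = ps.foldl (fun acc kv => acc ++ (kv.2.filter (fun c => c == x)).map (fun _ => kv.1)) acc := by
        apply PySem.List.foldl_congr_mem
        intro a kv _
        exact PySem.List.foldl_append_if (fun c => c == x) (fun _ => kv.1) kv.2 a
    _ = acc ++ ps.flatMap (fun kv => (kv.2.filter (fun c => c == x)).map (fun _ => kv.1)) :=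
        PySem.List.foldl_append_eq_flatMap _ ps acc
    _ = acc ++ pvOcc ps x := by
        simp [pvOcc, List.filter_flatMap, List.map_flatMap, List.filter_map, Function.comp_def]

lemma pvRev_getD (ps : List (String × List String)) (x : String) :
    (ps.foldl (fun rev kv =>
        kv.2.foldl (fun rev child => rev.modify child [] (· ++ [kv.1])) rev)
      (PySem.Dict.empty : PySem.Dict String (List String))).getD x [] = pvOcc ps x := by
  have hflat : ps.foldl (fun rev kv =>
        kv.2.foldl (fun rev child => rev.modify child [] (· ++ [kv.1])) rev)
      (PySem.Dict.empty : PySem.Dict String (List String))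
      = (ps.flatMap (fun kv => kv.2.map (fun c => (c, kv.1)))).foldl
          (fun rev p => rev.modify p.1 [] (· ++ [p.2])) PySem.Dict.empty := by
    rw [List.foldl_flatMap]
    apply PySem.List.foldl_congr_mem
    intro rev kv _
    rw [List.foldl_map]
  rw [hflat, PySem.Dict.getD_foldl_modify_append]
  simp [pvOcc]

-- ===== VERDICT (by name: the statement is the Claim_ definition above) =====
theorem findGrandparent_spec : Claim_equal_findGrandparent := by
  intro parents grandchild _ hpre
  unfold Spec_findGrandparent
  simp only [findGrandparent, findGrandparent_alt]
  have hnd : (PySem.Dict.mk parents).keys.Nodup := hpre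
  have hget : ∀ kv ∈ parents, (PySem.Dict.mk parents).getD kv.1 [] = kv.2 := by
    intro kv hkv
    have hkv' : (kv.1, kv.2) ∈ (PySem.Dict.mk parents).items := by
      simpa using hkv
    exact PySem.Dict.getD_of_mem_items (PySem.Dict.mk parents) hkv' hnd []
  have hkeys : (PySem.Dict.mk parents).keys = parents.map (·.1) := rfl
  simp only [hkeys, pvRev_getD]
  rw [pvFoldKeys parents (fun k => (PySem.Dict.mk parents).getD k []) _ hget,
      pvScan_acc, List.nil_append]
  have hinner : ∀ (gps acc : List String),
      gps.foldl (fun acc p =>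
        (parents.map (·.1)).foldl (fun acc2 cp =>
          ((PySem.Dict.mk parents).getD cp []).foldl (fun a c =>
            if c == p then a ++ [cp] else a) acc2) acc) acc
      = acc ++ gps.flatMap (fun p => pvOcc parents p) := by
    intro gps
    induction gps with
    | nil => intro acc; simp
    | cons p rest ih =>
        intro acc
        simp only [List.foldl_cons, List.flatMap_cons]
        rw [pvFoldKeys parents (fun k => (PySem.Dict.mk parents).getD k []) _ hget,
            pvScan_acc, ih, List.append_assoc]
  have := hinner (pvOcc parents grandchild) []
  simpa using this
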